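-- pv_equiv track=rewrite | github.com/PaulAlexander19/LabADAGrupoB | Clases/Lab07/Deque/5.InterviewWait.py | InterviewWait
-- ===== SOURCE A (Python) =====
-- def InterviewWait(listaWait):
--     resul = 0
--
--     while True:
--         # Verificamos si ya termianmos
--         if(listaWait[0] < 0):
--             return resul
--         elif(listaWait[-1] < 0):
--             return resul
--         # Ingresamos el minimo valor
--         else:
--             if(listaWait[0] < listaWait[-1]):
--                 resul += listaWait.pop(0) ## accedemos al primer elemento por la izquierda
--             else:
--                 resul += listaWait.pop(-1) ## accedemos con primer elemeto por la derecha
--     return resul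
-- ===== SOURCE B (Python) =====
-- def InterviewWait(listaWait):
--     # Barrier-based two-pointer scan: find the first and last negative once,
--     # then sum the smaller end moving the pointers; no mutation of the argument.
--     neg = [k for k, v in enumerate(listaWait) if v < 0]
--     p, q = neg[0], neg[-1]
--     resul = 0
--     i, j = 0, len(listaWait) - 1
--     while i < p and j > q:
--         a, b = listaWait[i], listaWait[j]
--         if a < b:
--             resul += a
--             i += 1
--         else:
--             resul += b
--             j -= 1
--     return resul
-- ===== Notes on version B (the rewrite author's own statement) =====
-- stated objective: alternative
-- what changed: Replaced the mutating loop of list.pop(0)/pop(-1) by a non-mutating pass that precomputes the first/last negative barrier indices and then runs a two-pointer merge between them.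
import Mathlib
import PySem

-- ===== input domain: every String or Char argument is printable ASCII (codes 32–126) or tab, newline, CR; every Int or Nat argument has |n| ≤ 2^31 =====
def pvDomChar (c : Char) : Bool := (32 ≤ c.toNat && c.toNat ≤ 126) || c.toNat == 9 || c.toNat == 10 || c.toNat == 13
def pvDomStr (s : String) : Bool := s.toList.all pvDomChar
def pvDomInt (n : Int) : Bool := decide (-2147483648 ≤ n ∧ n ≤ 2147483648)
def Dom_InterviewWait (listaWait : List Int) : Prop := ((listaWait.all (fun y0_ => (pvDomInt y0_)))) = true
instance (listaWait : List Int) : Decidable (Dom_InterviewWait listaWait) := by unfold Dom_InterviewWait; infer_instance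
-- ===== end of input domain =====

-- B replaces A's mutating pop(0)/pop(-1) loop by a non-mutating two-pointer scan between
-- precomputed first/last-negative barrier indices; A pops its argument empty in place
-- (B does not mutate), so the claim is about the RETURN value only.

-- ===== PORT A =====
-- A's while-True loop: each pass either returns or pops one element, so list length + 1 is enough
-- fuel; the fuel-0 branch and the 'none' (IndexError) branches are unreachable inside Pre_.
def InterviewWaitGo (fuel : Nat) (listaWait : List Int) (resul : Int) : Int :=
  match fuel with
  | 0 => resul
  | fuel + 1 =>
    match PySem.List.pyGet? listaWait 0, PySem.List.pyGet? listaWait (-1) with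
    | some a, some b =>
      if a < 0 then resul
      else if b < 0 then resul
      else if a < b then InterviewWaitGo fuel (listaWait.drop 1) (resul + a)   -- resul += pop(0)
      else InterviewWaitGo fuel listaWait.dropLast (resul + b)                 -- resul += pop(-1)
    | _, _ => resul  -- IndexError (excluded by Pre_)

def InterviewWait (listaWait : List Int) : Int :=
  InterviewWaitGo (listaWait.length + 1) listaWait 0

-- ===== PORT B =====
-- Source B's while loop; its indices i, j, p, q are nonnegative in Python, so they are Nat here and
-- List.getD is exact for Python's in-range listaWait[i] / listaWait[j].
def InterviewWaitAltGo (arr : List Int) (p q i j : Nat) (resul : Int) : Int :=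
  if i < p ∧ q < j then
    let a := arr.getD i 0
    let b := arr.getD j 0
    if a < b then InterviewWaitAltGo arr p q (i + 1) j (resul + a)
    else InterviewWaitAltGo arr p q i (j - 1) (resul + b)
  else resul
termination_by (p - i) + (j - q)

-- '[k for k, v in enumerate(listaWait) if v < 0]' is zipIdx (value, index) filtered on the value
-- (exact: enumerate's indices are nonnegative); 'neg[0]' / 'neg[-1]' raise IndexError on an
-- all-nonnegative list — outside Pre_ — so headD/getLastD return a junk 0 there.
def InterviewWait_alt (listaWait : List Int) : Int :=
  let neg := (listaWait.zipIdx.filter (fun kv => decide (kv.1 < 0))).map Prod.snd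
  let p := neg.headD 0
  let q := neg.getLastD 0
  InterviewWaitAltGo listaWait p q 0 (listaWait.length - 1) 0

-- ===== PRECONDITION & SPEC =====
-- Pre_ excludes exactly the inputs on which both Pythons raise IndexError: lists with no negative
-- element (A pops the list empty and indexes it; B indexes its empty list of negative positions).
def Pre_InterviewWait (listaWait : List Int) : Prop := ∃ x ∈ listaWait, x < 0
instance (listaWait : List Int) : Decidable (Pre_InterviewWait listaWait) := by
  unfold Pre_InterviewWait; infer_instance

def pvWitness_InterviewWait : List Int := [3, 1, -2, 4]

def Spec_InterviewWait (listaWait : List Int) (out : Int) : Prop := out = InterviewWait_alt listaWait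
instance (listaWait : List Int) (out : Int) : Decidable (Spec_InterviewWait listaWait out) := by
  unfold Spec_InterviewWait; infer_instance

-- ===== CLAIM (what is proved, stated in full; the proofs are below) =====
def Claim_equal_InterviewWait : Prop := ∀ (listaWait : List Int), Dom_InterviewWait listaWait → Pre_InterviewWait listaWait → Spec_InterviewWait listaWait (InterviewWait listaWait)

-- ===== LEMMAS AND PROOFS =====

-- B's filtered-enumerate index list is empty iff the list has no negative element.
theorem negIdx_nil_iff (l : List Int) (k : Nat) :
    ((l.zipIdx k).filter (fun kv => decide (kv.1 < 0))).map Prod.snd = [] ↔ ∀ x ∈ l, 0 ≤ x := by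
  induction l generalizing k with
  | nil => simp
  | cons x xs ih =>
    by_cases hx : x < 0
    · simp only [List.zipIdx_cons, List.filter_cons]
      simp [hx]
    · simp only [List.zipIdx_cons, List.filter_cons]
      simp [hx, ih (k + 1)]
      intro h
      omega

-- neg[0] is the first negative position (with offset k): everything before it is nonnegative.
theorem negIdx_head_spec (l : List Int) (k : Nat)
    (h : ((l.zipIdx k).filter (fun kv => decide (kv.1 < 0))).map Prod.snd ≠ []) :
    ∃ n : Nat, (((l.zipIdx k).filter (fun kv => decide (kv.1 < 0))).map Prod.snd).headD 0 = k + n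
      ∧ n < l.length ∧ l.getD n 0 < 0 ∧ ∀ m < n, 0 ≤ l.getD m 0 := by
  induction l generalizing k with
  | nil => simp at h
  | cons x xs ih =>
    by_cases hx : x < 0
    · refine ⟨0, ?_⟩
      simp [List.zipIdx_cons, hx]
    · have h' : ((xs.zipIdx (k + 1)).filter (fun kv => decide (kv.1 < 0))).map Prod.snd ≠ [] := by
        simpa [List.zipIdx_cons, List.filter_cons, hx] using h
      obtain ⟨n, hh, hn, hneg, hpre⟩ := ih (k + 1) h'
      refine ⟨n + 1, ?_, by simpa using hn, by simpa using hneg, ?_⟩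
      · simp only [List.zipIdx_cons, List.filter_cons]
        simp [hx] at hh ⊢
        omega
      · intro m hm
        match m with
        | 0 => simpa using Int.not_lt.mp hx
        | m + 1 => simpa using hpre m (by omega)

theorem getLastD_cons_of_ne_nil {α : Type} (a d : α) (l : List α) (h : l ≠ []) :
    (a :: l).getLastD d = l.getLastD d := by
  cases l with
  | nil => exact absurd rfl h
  | cons y ys => simp

-- neg[-1] is the last negative position (with offset k): everything after it is nonnegative.
theorem negIdx_last_spec (l : List Int) (k : Nat)
    (h : ((l.zipIdx k).filter (fun kv => decide (kv.1 < 0))).map Prod.snd ≠ []) :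
    ∃ n : Nat, (((l.zipIdx k).filter (fun kv => decide (kv.1 < 0))).map Prod.snd).getLastD 0 = k + n
      ∧ n < l.length ∧ l.getD n 0 < 0 ∧ ∀ m, n < m → m < l.length → 0 ≤ l.getD m 0 := by
  induction l generalizing k with
  | nil => simp at h
  | cons x xs ih =>
    by_cases hrest : ((xs.zipIdx (k + 1)).filter (fun kv => decide (kv.1 < 0))).map Prod.snd = []
    · -- the tail has no negative: the head element is the (only) negative, so neg = [k]
      have hx : x < 0 := by
        by_contra hx
        apply h
        simp [List.zipIdx_cons, hx, hrest]
      have htail : ∀ y ∈ xs, 0 ≤ y := (negIdx_nil_iff xs (k + 1)).mp hrest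
      refine ⟨0, ?_, by simp, by simpa using hx, ?_⟩
      · simp [List.zipIdx_cons, hx, hrest]
      · intro m hm hlen
        match m with
        | m + 1 =>
          simp only [List.getD_cons_succ]
          have hml : m < xs.length := by simpa using hlen
          rw [List.getD_eq_getElem xs 0 hml]
          exact htail _ (List.getElem_mem hml)
    · obtain ⟨n, hh, hn, hneg, hpost⟩ := ih (k + 1) hrest
      refine ⟨n + 1, ?_, by simpa using hn, by simpa using hneg, ?_⟩
      · simp only [List.zipIdx_cons, List.filter_cons]
        by_cases hx : x < 0
        · simp only [hx, decide_true, if_true, List.map_cons]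
          rw [getLastD_cons_of_ne_nil _ _ _ (by simpa using hrest), hh]
          omega
        · simp [hx] at hh ⊢
          omega
      · intro m hm hlen
        match m with
        | m + 1 => simpa using hpost m (by omega) (by simpa using hlen)

-- A's state after some pops is the contiguous segment arr[i..j]; with the barriers p (first
-- negative) and q (last negative) the two loops step in lock-step, one element per unit of fuel.
theorem interviewWait_go_eq (fuel : Nat) :
    ∀ (arr : List Int) (p q i j : Nat) (r : Int),
      p < arr.length → arr.getD p 0 < 0 → (∀ m < p, 0 ≤ arr.getD m 0) →
      q < arr.length → arr.getD q 0 < 0 → (∀ m, q < m → m < arr.length → 0 ≤ arr.getD m 0) →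
      i ≤ p → q ≤ j → j < arr.length → j + 1 - i ≤ fuel →
      InterviewWaitGo fuel ((arr.drop i).take (j + 1 - i)) r = InterviewWaitAltGo arr p q i j r := by
  induction fuel with
  | zero =>
    intro arr p q i j r hp hpneg hpre hq hqneg hpost hip hqj hj hf
    -- fuel 0 is impossible: i ≤ p ≤ q ≤ j makes the segment nonempty
    have hpq : p ≤ q := by
      by_contra hpq
      exact absurd (hpre q (by omega)) (by omega)
    omega
  | succ fuel ih =>
    intro arr p q i j r hp hpneg hpre hq hqneg hpost hip hqj hj hf
    have hpq : p ≤ q := by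
      by_contra hpq
      exact absurd (hpre q (by omega)) (by omega)
    have hij : i ≤ j := by omega
    have hlen : ((arr.drop i).take (j + 1 - i)).length = j + 1 - i := by
      simp [List.length_take, List.length_drop]; omega
    set seg := (arr.drop i).take (j + 1 - i) with hseg
    have hhead : PySem.List.pyGet? seg 0 = some (arr.getD i 0) := by
      rw [PySem.List.pyGet?_zero, hseg, List.getElem?_take_of_lt (by omega),
        List.getElem?_drop, Nat.add_zero]
      simp [List.getD, List.getElem?_eq_getElem (show i < arr.length by omega)]
    have hlast : PySem.List.pyGet? seg (-1) = some (arr.getD j 0) := by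
      rw [PySem.List.pyGet?_neg_one, List.getLast?_eq_getElem?, hlen, hseg,
        List.getElem?_take_of_lt (by omega), List.getElem?_drop]
      have : i + (j + 1 - i - 1) = j := by omega
      rw [this]
      simp [List.getD, List.getElem?_eq_getElem hj]
    rw [InterviewWaitGo, hhead, hlast, InterviewWaitAltGo]
    dsimp only
    set a := arr.getD i 0 with ha'
    set b := arr.getD j 0 with hb'
    by_cases hia : i < p
    · have ha : ¬ a < 0 := by
        have := hpre i hia; omega
      by_cases hjb : q < j
      · have hb : ¬ b < 0 := by
          have := hpost j hjb hj; omega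
        rw [if_pos (show i < p ∧ q < j from ⟨hia, hjb⟩), if_neg ha, if_neg hb]
        by_cases hab : a < b
        · rw [if_pos hab]
          have hdrop : seg.drop 1 = (arr.drop (i + 1)).take (j + 1 - (i + 1)) := by
            rw [hseg, List.drop_take, List.drop_drop]
            congr 1
          rw [hdrop, ih arr p q (i + 1) j (r + a) hp hpneg hpre hq hqneg hpost (by omega) hqj hj
              (by omega), if_pos hab]
        · rw [if_neg hab]
          have hdl : seg.dropLast = (arr.drop i).take (j - 1 + 1 - i) := by
            rw [hseg, List.dropLast_eq_take, hlen, List.take_take]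
            congr 1
            omega
          rw [hdl, ih arr p q i (j - 1) (r + b) hp hpneg hpre hq hqneg hpost hip (by omega)
              (by omega) (by omega), if_neg hab]
      · -- j = q: the back of the segment is negative, both loops stop with r
        have hjq : j = q := by omega
        have hb : b < 0 := by rw [hb', hjq]; exact hqneg
        have ha2 : ¬ a < 0 := by have := hpre i hia; omega
        rw [if_neg (show ¬ (i < p ∧ q < j) by omega), if_neg ha2, if_pos hb]
    · -- i = p: the front of the segment is negative, both loops stop with r
      have hip' : i = p := by omega
      have ha : a < 0 := by rw [ha', hip']; exact hpneg
      rw [if_neg (show ¬ (i < p ∧ q < j) by omega), if_pos ha]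

-- ===== VERDICT (by name: the statement is the Claim_ definition above) =====
theorem InterviewWait_spec : Claim_equal_InterviewWait := by
  intro l _ hpre
  unfold Spec_InterviewWait InterviewWait InterviewWait_alt
  have hne : (l.zipIdx.filter (fun kv => decide (kv.1 < 0))).map Prod.snd ≠ [] := by
    rw [Ne, negIdx_nil_iff l 0]
    intro hall
    obtain ⟨x, hx, hneg⟩ := hpre
    exact absurd (hall x hx) (by omega)
  obtain ⟨np, hh, hnp, hnegp, hprep⟩ := negIdx_head_spec l 0 hne
  obtain ⟨nq, hl2, hnq, hnegq, hpostq⟩ := negIdx_last_spec l 0 hne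
  simp only at hh hl2 ⊢
  rw [hh, hl2, Nat.zero_add, Nat.zero_add]
  have hlen0 : 0 < l.length := by omega
  have hseg : (l.drop 0).take (l.length - 1 + 1 - 0) = l := by
    rw [List.drop_zero]
    have : l.length - 1 + 1 - 0 = l.length := by omega
    rw [this, List.take_length]
  have hip' : (0 : Nat) ≤ np := Nat.zero_le _
  have hqj' : nq ≤ l.length - 1 := by omega
  have hj' : l.length - 1 < l.length := by omega
  have hf' : l.length - 1 + 1 - 0 ≤ l.length + 1 := by omega
  rw [← interviewWait_go_eq (l.length + 1) l np nq 0 (l.length - 1) 0 hnp hnegp hprep hnq hnegq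
      hpostq hip' hqj' hj' hf', hseg]
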